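-- pv_equiv track=rewrite | github.com/tipa16384/adventofcode | 2024/day9funcs.py | run_generator
-- ===== SOURCE A (Python) =====
-- def run_generator(file_system: list):
--     current_run = None
--     count = 0
--     for i in range(len(file_system) - 1, -1, -1):
--         token = file_system[i]
--         if token == current_run:
--             count += 1
--         else:
--             if current_run is not None and current_run != -1:
--                 yield (current_run, i + 1, count)
--             current_run = token
--             count = 1
--     if current_run is not None and current_run != -1:
--         yield (current_run, 0, count)
-- ===== SOURCE B (Python) =====
-- def run_generator(file_system: list):
--     # Forward two-pointer grouping, then emit the collected runs in reverse
--     # to match the backward scan's emission order.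
--     runs = []
--     n = len(file_system)
--     i = 0
--     while i < n:
--         j = i
--         while j < n and file_system[j] == file_system[i]:
--             j += 1
--         if file_system[i] != -1:
--             runs.append((file_system[i], i, j - i))
--         i = j
--     yield from reversed(runs)
-- ===== Notes on version B (the rewrite author's own statement) =====
-- stated objective: alternative
-- what changed: Replaces A's backward elementwise scan with mutable current_run/count state by a forward two-pointer grouping pass that collects (token, start, length) runs into a list and yields them reversed.
import Mathlib
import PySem

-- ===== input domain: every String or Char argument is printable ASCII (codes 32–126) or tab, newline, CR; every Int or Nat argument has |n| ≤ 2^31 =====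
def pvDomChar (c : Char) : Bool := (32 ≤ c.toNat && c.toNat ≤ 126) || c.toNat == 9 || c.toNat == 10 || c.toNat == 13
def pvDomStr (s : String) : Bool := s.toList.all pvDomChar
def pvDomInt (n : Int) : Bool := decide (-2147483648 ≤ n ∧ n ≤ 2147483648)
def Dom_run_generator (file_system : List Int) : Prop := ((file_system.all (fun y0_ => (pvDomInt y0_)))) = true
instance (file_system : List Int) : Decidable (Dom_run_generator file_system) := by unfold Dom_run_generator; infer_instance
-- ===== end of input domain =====

-- B replaces A's backward elementwise scan (mutable current_run/count state) by a
-- forward two-pointer grouping that collects the runs and emits them reversed; same values, alternative decomposition.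

-- ===== PORT A =====
-- the 'yield' guard: current_run is not None and current_run != -1
def flushA : Option Int → Int → Int → List (Int × Int × Int)
  | none, _, _ => []
  | some c, s, k => if c = -1 then [] else [(c, s, k)]

-- loop body of A; state = (current_run, count, yielded-so-far); token = file_system[i]
-- (the index i produced by range(len-1, -1, -1) is always in range, so pyGetD's default is never used)
def stepA (file_system : List Int) (st : Option Int × Int × List (Int × Int × Int)) (i : Int) :
    Option Int × Int × List (Int × Int × Int) :=
  let token := PySem.List.pyGetD file_system i 0
  match st with
  | (cur, count, acc) =>
    if cur = some token then (cur, count + 1, acc)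
    else (some token, 1, acc ++ flushA cur (i + 1) count)

def run_generator (file_system : List Int) : List (Int × Int × Int) :=
  let st := (PySem.List.pyRange ((file_system.length : Int) - 1) (-1) (-1)).foldl
              (stepA file_system) (none, 0, [])
  st.2.2 ++ flushA st.1 0 st.2.1

-- ===== PORT B =====
-- forward two-pointer grouping: inner while = takeWhile/dropWhile over the tail
def bRuns : List Int → Int → List (Int × Int × Int)
  | [], _ => []
  | x :: xs, start =>
    let len : Int := 1 + (xs.takeWhile (· == x)).length
    (if x = -1 then [] else [(x, start, len)]) ++ bRuns (xs.dropWhile (· == x)) (start + len)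
termination_by l _ => l.length
decreasing_by
  exact Nat.lt_succ_of_le (List.length_dropWhile_le _ _)

def run_generator_alt (file_system : List Int) : List (Int × Int × Int) :=
  (bRuns file_system 0).reverse

-- ===== PRECONDITION & SPEC =====
def Spec_run_generator (file_system : List Int) (out : List (Int × Int × Int)) : Prop := out = run_generator_alt file_system
instance (file_system : List Int) (out : List (Int × Int × Int)) : Decidable (Spec_run_generator file_system out) := by unfold Spec_run_generator; infer_instance

-- ===== CLAIM (what is proved, stated in full; the proofs are below) =====
def Claim_equal_run_generator : Prop := ∀ (file_system : List Int), Dom_run_generator file_system → Spec_run_generator file_system (run_generator file_system)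


-- ===== LEMMAS AND PROOFS =====

-- A's loop, rephrased as recursion on the reversed list (proof helper, not a port):
-- processing rs (the still-unprocessed prefix of file_system, reversed) with state (cur, count)
def recA : List Int → Option Int → Int → List (Int × Int × Int)
  | [], cur, count => flushA cur 0 count
  | t :: rs, cur, count =>
    if cur = some t then recA rs cur (count + 1)
    else flushA cur ((rs.length : Int) + 1) count ++ recA rs (some t) 1

lemma loopA_eq (fs : List Int) :
    ∀ (rs : List Int) (cur : Option Int) (count : Int) (acc : List (Int × Int × Int)),
      rs.reverse <+: fs →
      (let st := (PySem.List.pyRange ((rs.length : Int) - 1) (-1) (-1)).foldl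
                   (stepA fs) (cur, count, acc)
       st.2.2 ++ flushA st.1 0 st.2.1) = acc ++ recA rs cur count := by
  intro rs
  induction rs with
  | nil =>
    intro cur count acc _
    rw [PySem.List.pyRange_neg_one_eq_nil (by norm_num)]
    simp [recA]
  | cons t rs ih =>
    intro cur count acc hpre
    have hp : (rs.reverse ++ [t]) <+: fs := by simpa using hpre
    have hlt : rs.length < fs.length := by
      have := hp.length_le; simp at this; omega
    have hget : PySem.List.pyGetD fs ((rs.length : Int)) 0 = t := by
      rw [PySem.List.pyGetD_eq_getElem fs 0 (by positivity) (by exact_mod_cast hlt)]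
      have h1 : rs.length < (rs.reverse ++ [t]).length := by simp
      simp only [Int.toNat_natCast]
      exact (hp.getElem h1).symm.trans (List.getElem_concat_length (by simp) h1)
    have hlen : ((t :: rs).length : Int) - 1 = (rs.length : Int) := by
      simp [List.length_cons]
    rw [hlen, PySem.List.pyRange_neg_one_cons (by omega)]
    simp only [List.foldl_cons]
    have hpre' : rs.reverse <+: fs := ((rs.reverse.prefix_append [t]).trans hp)
    by_cases hc : cur = some t
    · have hstep : stepA fs (cur, count, acc) ((rs.length : Int)) = (cur, count + 1, acc) := by
        simp [stepA, hget, hc]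
      rw [hstep, ih cur (count + 1) acc hpre']
      simp [recA, hc]
    · have hstep : stepA fs (cur, count, acc) ((rs.length : Int)) =
          (some t, 1, acc ++ flushA cur ((rs.length : Int) + 1) count) := by
        simp [stepA, hget, hc]
      rw [hstep, ih (some t) 1 (acc ++ flushA cur ((rs.length : Int) + 1) count) hpre']
      simp [recA, hc, List.append_assoc]

lemma bRuns_replicate (c : Int) (count : Nat) (hc : 1 ≤ count) (start : Int) :
    bRuns (List.replicate count c) start
      = if c = -1 then [] else [(c, start, (count : Int))] := by
  obtain ⟨k, rfl⟩ : ∃ k, count = k + 1 := ⟨count - 1, by omega⟩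
  rw [List.replicate_succ]
  rw [bRuns]
  have ht : (List.replicate k c).takeWhile (· == c) = List.replicate k c := by
    simp
  have hd : (List.replicate k c).dropWhile (· == c) = [] := by
    simp
  rw [ht, hd, bRuns]
  simp only [List.length_replicate, List.append_nil]
  push_cast
  ring_nf

lemma bRuns_append_replicate (c : Int) (count : Nat) (hc : 1 ≤ count) :
    ∀ (n : Nat) (ys : List Int), ys.length ≤ n → ∀ (start : Int), ys.getLast? ≠ some c →
      bRuns (ys ++ List.replicate count c) start
        = bRuns ys start ++ (if c = -1 then [] else [(c, start + ys.length, (count : Int))]) := by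
  intro n
  induction n with
  | zero =>
    intro ys hn start _
    have : ys = [] := List.eq_nil_of_length_eq_zero (by omega)
    subst this
    simp [bRuns, bRuns_replicate c count hc]
  | succ n ih =>
    intro ys hn start hlast
    match ys with
    | [] => simp [bRuns, bRuns_replicate c count hc]
    | x :: xs =>
      by_cases hall : (xs.dropWhile (· == x)).isEmpty
      · -- the whole tail is x's: the replicate block is a fresh final group
        have hdxs : xs.dropWhile (· == x) = [] := by simpa [List.isEmpty_iff] using hall
        have htxs : xs.takeWhile (· == x) = xs := by
          have := List.takeWhile_append_dropWhile (p := (· == x)) (l := xs)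
          rwa [hdxs, List.append_nil] at this
        have hxall : ∀ a ∈ xs, a = x := by
          intro a ha
          have hmem : a ∈ xs.takeWhile (· == x) := by rw [htxs]; exact ha
          simpa using (List.mem_takeWhile_imp hmem)
        have hlastx : (x :: xs).getLast? = some x := by
          rcases List.eq_nil_or_concat xs with h | ⟨zs, z, rfl⟩
          · simp [h]
          · have hz : z = x := hxall z (by simp)
            have hcc : (x :: zs.concat z) = (x :: zs) ++ [z] := by simp
            rw [hcc, List.getLast?_append_of_ne_nil _ (by simp), hz]
            rfl
        have hxc : ¬ ((c == x) = true) := by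
          simp only [beq_iff_eq]
          intro h; exact hlast (by rw [hlastx, h])
        have hrt : (List.replicate count c).takeWhile (· == x) = [] := by
          rw [List.takeWhile_replicate, if_neg hxc]
        have hrd : (List.replicate count c).dropWhile (· == x) = List.replicate count c := by
          rw [List.dropWhile_replicate, if_neg hxc]
        have hTW : ((xs ++ List.replicate count c).takeWhile (· == x)) = xs := by
          rw [List.takeWhile_append, if_pos (by rw [htxs]), hrt, List.append_nil]
        have hDW : ((xs ++ List.replicate count c).dropWhile (· == x)) = List.replicate count c := by
          rw [List.dropWhile_append, if_pos (by rw [hdxs]; rfl), hrd]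
        rw [List.cons_append, bRuns, hTW, hDW, bRuns_replicate c count hc,
            bRuns, htxs, hdxs, bRuns]
        simp only [List.append_nil, List.length_cons]
        have harith : start + (1 + (xs.length : Int)) = start + ((xs.length + 1 : Nat) : Int) := by
          push_cast; ring
        rw [harith]
      · -- the boundary between runs is inside xs: peel the first group and recurse
        have hdxs : xs.dropWhile (· == x) ≠ [] := by
          simpa [List.isEmpty_iff] using hall
        have hxs : xs ≠ [] := by
          intro h; exact hdxs (by simp [h])
        have hlen : (xs.takeWhile (· == x)).length ≠ xs.length := by
          intro h
          have := List.takeWhile_append_dropWhile (p := (· == x)) (l := xs)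
          have h2 := congrArg List.length this
          simp only [List.length_append] at h2
          exact hdxs (List.eq_nil_of_length_eq_zero (by omega))
        have hglast : (xs.dropWhile (· == x)).getLast? = (x :: xs).getLast? := by
          obtain ⟨pre, hpre⟩ : xs.dropWhile (· == x) <:+ xs := List.dropWhile_suffix _
          have hcx : (x :: xs).getLast? = xs.getLast? := by
            obtain ⟨y, ys, rfl⟩ := List.exists_cons_of_ne_nil hxs
            rw [List.getLast?_cons_cons]
          rw [hcx]
          conv_rhs => rw [← hpre]
          rw [List.getLast?_append_of_ne_nil pre hdxs]
        have hTW : ((xs ++ List.replicate count c).takeWhile (· == x)) = xs.takeWhile (· == x) := by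
          rw [List.takeWhile_append, if_neg hlen]
        have hDW : ((xs ++ List.replicate count c).dropWhile (· == x))
            = xs.dropWhile (· == x) ++ List.replicate count c := by
          rw [List.dropWhile_append, if_neg (by simpa [List.isEmpty_iff] using hdxs)]
        rw [List.cons_append, bRuns, hTW, hDW, bRuns]
        have hle : (xs.dropWhile (· == x)).length ≤ n := by
          have h1 := List.length_dropWhile_le (· == x) xs
          simp only [List.length_cons] at hn
          omega
        rw [ih (xs.dropWhile (· == x)) hle
              (start + (1 + ((xs.takeWhile (· == x)).length : Int)))
              (by rw [hglast]; exact hlast)]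
        rw [List.append_assoc]
        have harith : start + (1 + ((xs.takeWhile (· == x)).length : Int))
              + ((xs.dropWhile (· == x)).length : Int)
            = start + (((x :: xs).length : Nat) : Int) := by
          have := List.takeWhile_append_dropWhile (p := (· == x)) (l := xs)
          have h2 := congrArg List.length this
          simp only [List.length_append] at h2
          simp only [List.length_cons]
          push_cast
          omega
        rw [harith]

lemma recA_eq :
    ∀ (rs : List Int) (c : Int) (count : Nat), 1 ≤ count →
      recA rs (some c) (count : Int) = (bRuns (rs.reverse ++ List.replicate count c) 0).reverse := by
  intro rs
  induction rs with
  | nil =>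
    intro c count hc
    rw [recA, List.reverse_nil, List.nil_append, bRuns_replicate c count hc]
    by_cases h : c = -1 <;> simp [flushA, h]
  | cons t rs ih =>
    intro c count hc
    by_cases h : c = t
    · subst h
      rw [recA, if_pos rfl]
      have hcast : (count : Int) + 1 = ((count + 1 : Nat) : Int) := by push_cast; ring
      have hl : (c :: rs).reverse ++ List.replicate count c
          = rs.reverse ++ List.replicate (count + 1) c := by
        simp [List.replicate_succ]
      rw [hcast, ih c (count + 1) (by omega), hl]
    · rw [recA, if_neg (by simpa using h)]
      have h1 : recA rs (some t) ((1 : Nat) : Int) = (bRuns (rs.reverse ++ List.replicate 1 t) 0).reverse :=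
        ih t 1 (by omega)
      simp only [Nat.cast_one, List.replicate_one] at h1
      rw [h1]
      have h2 := bRuns_append_replicate c count hc (rs.reverse ++ [t]).length (rs.reverse ++ [t])
        le_rfl 0 (by
          rw [List.getLast?_append_of_ne_nil _ (by simp)]
          simp only [List.getLast?_singleton, ne_eq, Option.some.injEq]
          intro hh; exact h hh.symm)
      have hrev : (t :: rs).reverse = rs.reverse ++ [t] := by simp
      rw [hrev, h2, List.reverse_append]
      by_cases hm : c = -1 <;> simp [flushA, hm]

-- ===== VERDICT (by name: the statement is the Claim_ definition above) =====
theorem run_generator_spec : Claim_equal_run_generator := by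
  intro fs _
  unfold Spec_run_generator run_generator run_generator_alt
  have h := loopA_eq fs fs.reverse none 0 [] (by simp)
  simp only [List.length_reverse] at h
  rw [h]
  rcases List.eq_nil_or_concat fs with rfl | ⟨ys, x, rfl⟩
  · simp [recA, flushA, bRuns]
  · have hrev : (ys.concat x).reverse = x :: ys.reverse := by simp
    rw [hrev, recA, if_neg (by simp)]
    have h1 := recA_eq ys.reverse x 1 le_rfl
    simp only [Nat.cast_one, List.replicate_one, List.reverse_reverse] at h1
    rw [List.nil_append, h1]
    simp [flushA, List.concat_eq_append]
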